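-- pv_equiv track=rewrite | github.com/vetesh2007/CRYPTOGRAPHY-CSA5112 | CRYPTO PRATICALS/37.py | apply_key
-- ===== SOURCE A (Python) =====
-- def apply_key(text,key):
--     out=[]
--     for ch in text:
--         if ch.upper() in key and ch.isalpha():
--             mapped=key[ch.upper()]
--             out.append(mapped.lower() if ch.islower() else mapped)
--         else:
--             out.append(ch)
--     return ''.join(out)
-- ===== SOURCE B (Python) =====
-- def apply_key(text, key):
--     table = {}
--     for k, v in key.items():
--         if len(k) == 1 and k.isupper():
--             table[k] = v
--             table[k.lower()] = v.lower()
--     return text.translate(str.maketrans(table))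
-- ===== Notes on version B (the rewrite author's own statement) =====
-- stated objective: idiomatic
-- what changed: B precomputes a full case-aware translation table (dict keyed by the literal character, both cases) once from the key and then applies it in a single table-driven pass via str.maketrans/str.translate, instead of A's per-character upper()/isalpha()/islower() branching with a dict lookup for every character.
import Mathlib
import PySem

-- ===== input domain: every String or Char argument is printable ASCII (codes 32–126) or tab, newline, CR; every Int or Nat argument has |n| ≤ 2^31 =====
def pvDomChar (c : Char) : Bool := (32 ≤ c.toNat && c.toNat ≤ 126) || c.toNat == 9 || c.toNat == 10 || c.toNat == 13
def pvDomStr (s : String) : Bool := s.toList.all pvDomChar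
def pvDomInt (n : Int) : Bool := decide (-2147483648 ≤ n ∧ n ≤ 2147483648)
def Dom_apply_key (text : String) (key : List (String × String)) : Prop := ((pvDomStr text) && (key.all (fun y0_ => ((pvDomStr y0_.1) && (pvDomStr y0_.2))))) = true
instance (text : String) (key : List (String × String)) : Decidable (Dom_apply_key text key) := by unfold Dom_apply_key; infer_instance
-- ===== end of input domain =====

-- B precomputes a full case-aware translation table once and then does one table-driven pass
-- (dict-lookup per character), instead of A's per-character upper/isalpha branching and key lookup.

-- ===== PORT A =====
def apply_key (text : String) (key : List (String × String)) : String :=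
  let d := PySem.Dict.ofList key
  let out : List String := text.toList.foldl (fun acc ch =>
    if d.contains (String.ofList [PySem.Chars.upperChar ch]) && PySem.Chars.isalpha ch then
      -- key[ch.upper()] cannot raise: guarded by the contains test
      let mapped := (d.get? (String.ofList [PySem.Chars.upperChar ch])).getD ""
      acc ++ [if PySem.Chars.islower ch then PySem.Str.lower mapped else mapped]
    else
      acc ++ [String.ofList [ch]]) []
  PySem.Str.join "" out

-- ===== PORT B =====
-- one key/value entry folded into the translation table (the loop body of Source B)
def tableStep (t : PySem.Dict String String) (p : String × String) : PySem.Dict String String :=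
  match p.1.toList with
  | [c] =>
    if PySem.Chars.isupper c then
      (t.insert p.1 p.2).insert (PySem.Str.lower p.1) (PySem.Str.lower p.2)
    else t
  | _ => t

def apply_key_alt (text : String) (key : List (String × String)) : String :=
  let table := (PySem.Dict.ofList key).items.foldl tableStep PySem.Dict.empty
  -- text.translate(str.maketrans(table)): characters without a table entry map to themselves
  PySem.Str.join "" (text.toList.map (fun ch => table.getD (String.ofList [ch]) (String.ofList [ch])))

-- ===== PRECONDITION & SPEC =====
def Spec_apply_key (text : String) (key : List (String × String)) (out : String) : Prop := out = apply_key_alt text key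
instance (text : String) (key : List (String × String)) (out : String) : Decidable (Spec_apply_key text key out) := by unfold Spec_apply_key; infer_instance

-- ===== CLAIM (what is proved, stated in full; the proofs are below) =====
def Claim_equal_apply_key : Prop := ∀ (text : String) (key : List (String × String)), Dom_apply_key text key → Spec_apply_key text key (apply_key text key)

-- ===== LEMMAS AND PROOFS =====

theorem char_le_toNat (a b : Char) : (a ≤ b) ↔ a.toNat ≤ b.toNat := by
  simp only [Char.le_def, UInt32.le_iff_toNat_le]; rfl

theorem isupper_toNat (c : Char) : PySem.Chars.isupper c = true ↔ (65 ≤ c.toNat ∧ c.toNat ≤ 90) := by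
  have hA : ('A' : Char).toNat = 65 := by decide
  have hZ : ('Z' : Char).toNat = 90 := by decide
  simp only [PySem.Chars.isupper, Bool.and_eq_true, decide_eq_true_eq, char_le_toNat, hA, hZ]

theorem islower_toNat (c : Char) : PySem.Chars.islower c = true ↔ (97 ≤ c.toNat ∧ c.toNat ≤ 122) := by
  have ha : ('a' : Char).toNat = 97 := by decide
  have hz : ('z' : Char).toNat = 122 := by decide
  simp only [PySem.Chars.islower, Bool.and_eq_true, decide_eq_true_eq, char_le_toNat, ha, hz]

theorem char_eq_of_toNat (a b : Char) (h : a.toNat = b.toNat) : a = b := Char.ext (UInt32.toNat_inj.mp h)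

theorem upperChar_of_upper (c : Char) (h : PySem.Chars.isupper c = true) :
    PySem.Chars.upperChar c = c := by
  rw [isupper_toNat] at h
  rw [PySem.Chars.upperChar, if_neg]
  rw [islower_toNat]; omega

theorem toNat_upperChar_of_lower (c : Char) (h : PySem.Chars.islower c = true) :
    (PySem.Chars.upperChar c).toNat = c.toNat - 32 := by
  have h' := (islower_toNat c).mp h
  rw [PySem.Chars.upperChar, if_pos h, Char.toNat_ofNat, if_pos]
  simp only [Nat.isValidChar]; omega

theorem toNat_lowerChar_of_upper (c : Char) (h : PySem.Chars.isupper c = true) :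
    (PySem.Chars.lowerChar c).toNat = c.toNat + 32 := by
  have h' := (isupper_toNat c).mp h
  rw [PySem.Chars.lowerChar, if_pos h, Char.toNat_ofNat, if_pos]
  simp only [Nat.isValidChar]; omega

theorem ofList_single_eq_iff (a b : Char) : String.ofList [a] = String.ofList [b] ↔ a = b := by
  constructor
  · intro h; have := congrArg String.toList h; simpa using this
  · intro h; rw [h]

theorem lower_single (c : Char) :
    PySem.Str.lower (String.ofList [c]) = String.ofList [PySem.Chars.lowerChar c] := by
  simp [PySem.Str.lower, PySem.Chars.lower]

-- per-character value produced by A (the body of A's loop as a function)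
def gA (d : PySem.Dict String String) (ch : Char) : String :=
  if d.contains (String.ofList [PySem.Chars.upperChar ch]) && PySem.Chars.isalpha ch then
    let mapped := (d.get? (String.ofList [PySem.Chars.upperChar ch])).getD ""
    if PySem.Chars.islower ch then PySem.Str.lower mapped else mapped
  else String.ofList [ch]

theorem foldA (d : PySem.Dict String String) (l : List Char) (acc : List String) :
    l.foldl (fun acc ch =>
      if d.contains (String.ofList [PySem.Chars.upperChar ch]) && PySem.Chars.isalpha ch then
        let mapped := (d.get? (String.ofList [PySem.Chars.upperChar ch])).getD ""
        acc ++ [if PySem.Chars.islower ch then PySem.Str.lower mapped else mapped]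
      else
        acc ++ [String.ofList [ch]]) acc = acc ++ l.map (gA d) := by
  induction l generalizing acc with
  | nil => simp
  | cons c rest ih =>
    simp only [List.foldl_cons, List.map_cons, ih, gA]
    by_cases h : (d.contains (String.ofList [PySem.Chars.upperChar c]) && PySem.Chars.isalpha c) = true
    · simp [h]
    · simp [h]


theorem not_lower_of_upper (c : Char) (h : PySem.Chars.isupper c = true) :
    PySem.Chars.islower c = false := by
  have h1 := (isupper_toNat c).mp h
  cases hcl : PySem.Chars.islower c with
  | false => rfl
  | true => exact absurd ((islower_toNat c).mp hcl) (by omega)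

theorem islower_lowerChar (c : Char) (h : PySem.Chars.isupper c = true) :
    PySem.Chars.islower (PySem.Chars.lowerChar c) = true := by
  rw [islower_toNat, toNat_lowerChar_of_upper c h]
  have := (isupper_toNat c).mp h
  omega

theorem isupper_upperChar (c : Char) (h : PySem.Chars.islower c = true) :
    PySem.Chars.isupper (PySem.Chars.upperChar c) = true := by
  rw [isupper_toNat, toNat_upperChar_of_lower c h]
  have := (islower_toNat c).mp h
  omega

theorem lowerChar_upperChar (c : Char) (h : PySem.Chars.islower c = true) :
    PySem.Chars.lowerChar (PySem.Chars.upperChar c) = c := by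
  apply char_eq_of_toNat
  rw [toNat_lowerChar_of_upper _ (isupper_upperChar c h), toNat_upperChar_of_lower c h]
  have := (islower_toNat c).mp h
  omega

-- a tableStep whose key entry cannot collide with the (non-lowercase) target character
theorem tableStep_getD_ne (t : PySem.Dict String String) (k v : String) (c : Char) (dflt : String)
    (hlow : PySem.Chars.islower c = false)
    (hne : ∀ c', k.toList = [c'] → PySem.Chars.isupper c' = true → c' ≠ c) :
    (tableStep t (k, v)).getD (String.ofList [c]) dflt = t.getD (String.ofList [c]) dflt := by
  cases hk : k.toList with
  | nil => simp only [tableStep, hk]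
  | cons c' cs =>
    cases cs with
    | cons d ds => simp only [tableStep, hk]
    | nil =>
      by_cases hup : PySem.Chars.isupper c' = true
      · have hkk : k = String.ofList [c'] := by rw [← hk, String.ofList_toList]
        simp only [tableStep, hk, hup, if_pos]
        rw [hkk, lower_single, PySem.Dict.getD_insert, if_neg, PySem.Dict.getD_insert, if_neg]
        · intro h
          rw [ofList_single_eq_iff] at h
          exact hne c' hk hup h.symm
        · intro h
          rw [ofList_single_eq_iff] at h
          rw [h, islower_lowerChar c' hup] at hlow
          cases hlow
      · simp only [tableStep, hk, hup, if_neg, Bool.false_eq_true, not_false_iff]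

-- same, for a lowercase target character whose uppercase is not the key
theorem tableStep_getD_ne_low (t : PySem.Dict String String) (k v : String) (c : Char) (dflt : String)
    (hlow : PySem.Chars.islower c = true)
    (hne : ∀ c', k.toList = [c'] → PySem.Chars.isupper c' = true → c' ≠ PySem.Chars.upperChar c) :
    (tableStep t (k, v)).getD (String.ofList [c]) dflt = t.getD (String.ofList [c]) dflt := by
  cases hk : k.toList with
  | nil => simp only [tableStep, hk]
  | cons c' cs =>
    cases cs with
    | cons d ds => simp only [tableStep, hk]
    | nil =>
      by_cases hup : PySem.Chars.isupper c' = true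
      · have hkk : k = String.ofList [c'] := by rw [← hk, String.ofList_toList]
        simp only [tableStep, hk, hup, if_pos]
        rw [hkk, lower_single, PySem.Dict.getD_insert, if_neg, PySem.Dict.getD_insert, if_neg]
        · intro h
          rw [ofList_single_eq_iff] at h
          rw [h, not_lower_of_upper c' hup] at hlow
          cases hlow
        · intro h
          rw [ofList_single_eq_iff] at h
          apply hne c' hk hup
          apply char_eq_of_toNat
          have h1 := toNat_lowerChar_of_upper c' hup
          have h2 := toNat_upperChar_of_lower c hlow
          have h3 : (PySem.Chars.lowerChar c').toNat = c.toNat := by rw [← h]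
          have := (islower_toNat c).mp hlow
          omega
      · simp only [tableStep, hk, hup, if_neg, Bool.false_eq_true, not_false_iff]

-- table lookup for an uppercase character: the (unique) key entry for it, else the default
theorem table_getD_upper (c : Char) (hc : PySem.Chars.isupper c = true) :
    ∀ (l : List (String × String)) (t : PySem.Dict String String) (dflt : String),
      (l.map Prod.fst).Nodup →
      (l.foldl tableStep t).getD (String.ofList [c]) dflt =
        (match l.find? (fun p => p.1 == String.ofList [c]) with
         | some p => p.2
         | none => t.getD (String.ofList [c]) dflt) := by
  intro l
  induction l with
  | nil => intro t dflt _; rfl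
  | cons p rest ih =>
    intro t dflt hn
    obtain ⟨k, v⟩ := p
    simp only [List.map_cons, List.nodup_cons] at hn
    obtain ⟨hk_notin, hn'⟩ := hn
    simp only [List.foldl_cons]
    by_cases hks : k = String.ofList [c]
    · subst hks
      rw [List.find?_cons_of_pos (by simp)]
      rw [ih _ _ hn']
      have hfind : rest.find? (fun p => p.1 == String.ofList [c]) = none := by
        rw [List.find?_eq_none]
        intro x hx
        simp only [beq_iff_eq]
        intro hx1
        exact hk_notin (hx1 ▸ List.mem_map_of_mem hx)
      rw [hfind]
      show (tableStep t (String.ofList [c], v)).getD _ _ = v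
      simp only [tableStep, String.toList_ofList, hc, if_pos]
      rw [lower_single, PySem.Dict.getD_insert, if_neg, PySem.Dict.getD_insert, if_pos rfl]
      intro h
      rw [ofList_single_eq_iff] at h
      have := islower_lowerChar c hc
      rw [← h, not_lower_of_upper c hc] at this
      cases this
    · rw [List.find?_cons_of_neg (by simp [hks])]
      rw [ih _ _ hn']
      have hstep : (tableStep t (k, v)).getD (String.ofList [c]) dflt = t.getD (String.ofList [c]) dflt := by
        apply tableStep_getD_ne t k v c dflt (not_lower_of_upper c hc)
        intro c' hk' _ h
        apply hks
        rw [← String.ofList_toList (s := k), hk', h]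
      cases hfind : rest.find? (fun p => p.1 == String.ofList [c]) with
      | some q => rfl
      | none => exact hstep

-- table lookup for a lowercase character: lowercased value of the entry for its uppercase, else default
theorem table_getD_lower (c : Char) (hc : PySem.Chars.islower c = true) :
    ∀ (l : List (String × String)) (t : PySem.Dict String String) (dflt : String),
      (l.map Prod.fst).Nodup →
      (l.foldl tableStep t).getD (String.ofList [c]) dflt =
        (match l.find? (fun p => p.1 == String.ofList [PySem.Chars.upperChar c]) with
         | some p => PySem.Str.lower p.2
         | none => t.getD (String.ofList [c]) dflt) := by
  intro l
  induction l with
  | nil => intro t dflt _; rfl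
  | cons p rest ih =>
    intro t dflt hn
    obtain ⟨k, v⟩ := p
    simp only [List.map_cons, List.nodup_cons] at hn
    obtain ⟨hk_notin, hn'⟩ := hn
    simp only [List.foldl_cons]
    by_cases hks : k = String.ofList [PySem.Chars.upperChar c]
    · subst hks
      rw [List.find?_cons_of_pos (by simp)]
      rw [ih _ _ hn']
      have hfind : rest.find? (fun p => p.1 == String.ofList [PySem.Chars.upperChar c]) = none := by
        rw [List.find?_eq_none]
        intro x hx
        simp only [beq_iff_eq]
        intro hx1
        exact hk_notin (hx1 ▸ List.mem_map_of_mem hx)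
      rw [hfind]
      show (tableStep t (String.ofList [PySem.Chars.upperChar c], v)).getD _ _ = PySem.Str.lower v
      simp only [tableStep, String.toList_ofList, isupper_upperChar c hc, if_pos]
      rw [lower_single, lowerChar_upperChar c hc, PySem.Dict.getD_insert, if_pos rfl]
    · rw [List.find?_cons_of_neg (by simp [hks])]
      rw [ih _ _ hn']
      have hstep : (tableStep t (k, v)).getD (String.ofList [c]) dflt = t.getD (String.ofList [c]) dflt := by
        apply tableStep_getD_ne_low t k v c dflt hc
        intro c' hk' _ h
        apply hks
        rw [← String.ofList_toList (s := k), hk', h]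
      cases hfind : rest.find? (fun p => p.1 == String.ofList [PySem.Chars.upperChar c]) with
      | some q => rfl
      | none => exact hstep

-- a non-letter character is never a table key
theorem table_getD_other (c : Char) (hu : PySem.Chars.isupper c = false)
    (hl : PySem.Chars.islower c = false) :
    ∀ (l : List (String × String)) (t : PySem.Dict String String) (dflt : String),
      (l.foldl tableStep t).getD (String.ofList [c]) dflt = t.getD (String.ofList [c]) dflt := by
  intro l
  induction l with
  | nil => intro t dflt; rfl
  | cons p rest ih =>
    intro t dflt
    obtain ⟨k, v⟩ := p
    simp only [List.foldl_cons]
    rw [ih]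
    apply tableStep_getD_ne t k v c dflt hl
    intro c' _ hup' h
    rw [h] at hup'
    rw [hup'] at hu
    cases hu

theorem char_step_eq (d : PySem.Dict String String) (hn : d.keys.Nodup) (ch : Char) :
    gA d ch = (d.items.foldl tableStep PySem.Dict.empty).getD (String.ofList [ch]) (String.ofList [ch]) := by
  have hn' : (d.items.map Prod.fst).Nodup := by
    simpa [PySem.Dict.keys] using hn
  by_cases hu : PySem.Chars.isupper ch = true
  · have hl : PySem.Chars.islower ch = false := not_lower_of_upper ch hu
    rw [table_getD_upper ch hu d.items _ _ hn']
    unfold gA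
    rw [upperChar_of_upper ch hu]
    cases hfind : d.items.find? (fun p => p.1 == String.ofList [ch]) with
    | some q =>
      have hcont : d.contains (String.ofList [ch]) = true := by
        simp only [PySem.Dict.contains, List.any_eq_true]
        refine ⟨q, List.mem_of_find?_eq_some hfind, ?_⟩
        have hq := List.find?_some hfind
        simpa using hq
      have hget : d.get? (String.ofList [ch]) = some q.2 := by
        simp only [PySem.Dict.get?, hfind, Option.map_some]
      simp [hcont, hget, PySem.Chars.isalpha, hu, hl]
    | none =>
      have hcont : d.contains (String.ofList [ch]) = false := by
        simp only [PySem.Dict.contains, List.any_eq_false]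
        intro x hx
        exact List.find?_eq_none.mp hfind x hx
      simp [hcont, PySem.Dict.getD_empty]
  · by_cases hlo : PySem.Chars.islower ch = true
    · rw [table_getD_lower ch hlo d.items _ _ hn']
      unfold gA
      cases hfind : d.items.find? (fun p => p.1 == String.ofList [PySem.Chars.upperChar ch]) with
      | some q =>
        have hcont : d.contains (String.ofList [PySem.Chars.upperChar ch]) = true := by
          simp only [PySem.Dict.contains, List.any_eq_true]
          refine ⟨q, List.mem_of_find?_eq_some hfind, ?_⟩
          have hq := List.find?_some hfind
          simpa using hq
        have hget : d.get? (String.ofList [PySem.Chars.upperChar ch]) = some q.2 := by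
          simp only [PySem.Dict.get?, hfind, Option.map_some]
        simp [hcont, hget, PySem.Chars.isalpha, hlo]
      | none =>
        have hcont : d.contains (String.ofList [PySem.Chars.upperChar ch]) = false := by
          simp only [PySem.Dict.contains, List.any_eq_false]
          intro x hx
          exact List.find?_eq_none.mp hfind x hx
        simp [hcont, PySem.Dict.getD_empty]
    · have hu' : PySem.Chars.isupper ch = false := by simpa using hu
      have hl' : PySem.Chars.islower ch = false := by simpa using hlo
      rw [table_getD_other ch hu' hl' d.items _ _]
      unfold gA
      simp [PySem.Chars.isalpha, hu', hl', PySem.Dict.getD_empty]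

-- ===== VERDICT (by name: the statement is the Claim_ definition above) =====
theorem apply_key_spec : Claim_equal_apply_key := by
  intro text key _
  unfold Spec_apply_key apply_key apply_key_alt
  simp only [foldA, List.nil_append]
  congr 1
  apply List.map_congr_left
  intro ch _
  exact char_step_eq (PySem.Dict.ofList key) (PySem.Dict.nodup_keys_ofList key) ch
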